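-- pv_equiv track=rewrite | github.com/lindseyferretti/Q-Less-Queries | main.py | _find_best_letter_position
-- ===== SOURCE A (Python) =====
-- def _find_best_letter_position(word, letter):
--     """Find the best position for a shared letter within a word.
--
--     Args:
--         word: The word to search in
--         letter: The letter to find
--
--     Returns:
--         Optimal position index
--     """
--     positions = [i for i, char in enumerate(word) if char == letter]
--
--     # Default to first occurrence
--     if not positions:
--         return 0
--
--     # Try to prefer positions closer to the middle of words for better layout
--     if len(positions) > 1:
--         # Choose position closest to the middle of the word
--         middle = len(word) // 2
--         return min(positions, key=lambda p: abs(p - middle))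
--
--     return positions[0]
-- ===== SOURCE B (Python) =====
-- def _find_best_letter_position(word, letter):
--     """Outward scan from the middle: no positions list is built; test the left
--     index before the right at each distance to keep the leftmost tie-break."""
--     if not word:
--         return 0
--     middle = len(word) // 2
--     for d in range(len(word) + 1):
--         i = middle - d
--         if i >= 0 and word[i] == letter:
--             return i
--         j = middle + d
--         if j < len(word) and word[j] == letter:
--             return j
--     return 0
-- ===== Notes on version B (the rewrite author's own statement) =====
-- stated objective: alternative
-- what changed: Instead of building the list of all matching positions and taking min by distance to the middle, B scans outward from the middle index, testing the left index before the right at each distance, and returns the first match (0 if none).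
import Mathlib
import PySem

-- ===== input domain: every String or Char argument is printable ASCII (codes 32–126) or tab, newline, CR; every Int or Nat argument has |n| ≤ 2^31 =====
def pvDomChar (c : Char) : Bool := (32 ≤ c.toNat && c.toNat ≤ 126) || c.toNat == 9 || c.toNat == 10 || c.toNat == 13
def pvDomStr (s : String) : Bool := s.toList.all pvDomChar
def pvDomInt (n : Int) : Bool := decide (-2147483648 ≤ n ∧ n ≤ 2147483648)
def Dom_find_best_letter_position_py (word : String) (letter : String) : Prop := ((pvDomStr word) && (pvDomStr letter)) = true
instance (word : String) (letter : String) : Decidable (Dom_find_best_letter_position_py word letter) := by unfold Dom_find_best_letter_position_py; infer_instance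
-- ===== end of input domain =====

-- B builds no positions list: it scans outward from the middle index (left before right
-- at each distance) and returns the first match; same return value, alternative algorithm.

-- ===== PORT A =====
-- positions = [i for i, char in enumerate(word) if char == letter]
def pvPos (cs : List Char) (letter : String) : List Int :=
  ((PySem.List.enumerate cs 0).filter (fun ic => String.ofList [ic.2] == letter)).map (fun ic => ic.1)

def find_best_letter_position_py (word : String) (letter : String) : Int :=
  let positions := pvPos word.toList letter
  if positions = [] then 0
  else if 1 < positions.length then
    let middle : Int := PySem.Int.floordiv (word.toList.length : Int) 2
    -- min(positions, key=lambda p: abs(p - middle)); the none branch is unreachable (positions ≠ [])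
    match PySem.List.min? positions (fun p => |p - middle|) with
    | some m => m
    | none => 0
  else
    positions.headD 0  -- positions[0] (positions ≠ [] here)

-- ===== PORT B =====
-- word[i] == letter, as a total test (the guarded indices in B are always in range)
def pvHit (cs : List Char) (letter : String) (i : Int) : Bool :=
  match PySem.List.pyGet? cs i with
  | some c => String.ofList [c] == letter
  | none => false

-- for d in range(len(word)+1): try middle-d (if >= 0) then middle+d (if < len)
def pvScan (cs : List Char) (letter : String) (middle : Int) (d : Int) : Nat → Int
  | 0 => 0
  | fuel+1 =>
    if 0 ≤ middle - d && pvHit cs letter (middle - d) then middle - d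
    else if middle + d < (cs.length : Int) && pvHit cs letter (middle + d) then middle + d
    else pvScan cs letter middle (d+1) fuel

def find_best_letter_position_py_alt (word : String) (letter : String) : Int :=
  let cs := word.toList
  if cs.isEmpty then 0
  else pvScan cs letter (PySem.Int.floordiv (cs.length : Int) 2) 0 (cs.length + 1)

-- ===== PRECONDITION & SPEC =====
def Spec_find_best_letter_position_py (word : String) (letter : String) (out : Int) : Prop := out = find_best_letter_position_py_alt word letter
instance (word : String) (letter : String) (out : Int) : Decidable (Spec_find_best_letter_position_py word letter out) := by unfold Spec_find_best_letter_position_py; infer_instance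

-- ===== CLAIM (what is proved, stated in full; the proofs are below) =====
def Claim_equal_find_best_letter_position_py : Prop := ∀ (word : String) (letter : String), Dom_find_best_letter_position_py word letter → Spec_find_best_letter_position_py word letter (find_best_letter_position_py word letter)

-- ===== LEMMAS AND PROOFS =====

-- Python's min-with-key loop over a nonempty list, with explicit accumulator
def pvMinFrom (key : Int → Int) (m : Int) (t : List Int) : Int :=
  t.foldl (fun m x => if key x < key m then x else m) m

theorem pvMin?_cons (key : Int → Int) : ∀ (t : List Int) (x : Int),
    PySem.List.min? (x :: t) key = some (pvMinFrom key x t) := by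
  intro t
  induction t with
  | nil => intro x; rfl
  | cons y t ih =>
    intro x
    have h1 : PySem.List.min? (x :: y :: t) key
        = PySem.List.min? ((if key y < key x then y else x) :: t) key := by
      simp only [PySem.List.min?, List.foldl_cons]
      by_cases h : key y < key x <;> simp [h]
    have h2 : pvMinFrom key x (y :: t) = pvMinFrom key (if key y < key x then y else x) t := by
      simp only [pvMinFrom, List.foldl_cons]
    rw [h1, ih, h2]

-- a first-minimal element with the stated properties IS what the min loop returns (xs sorted)
theorem pvMinFrom_spec (key : Int → Int) :
    ∀ (t : List Int) (x b : Int),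
      (x :: t).Pairwise (· < ·) → b ∈ x :: t →
      (∀ p ∈ x :: t, key b ≤ key p) → (∀ p ∈ x :: t, key p = key b → b ≤ p) →
      pvMinFrom key x t = b := by
  intro t
  induction t with
  | nil =>
    intro x b _ hb _ _
    simp only [List.mem_singleton] at hb
    simp [pvMinFrom, hb]
  | cons y t ih =>
    intro x b hsort hb hmin htie
    obtain ⟨hx_all, hsort'⟩ := List.pairwise_cons.mp hsort
    obtain ⟨hy_all, hsort''⟩ := List.pairwise_cons.mp hsort'
    have hxy : x < y := hx_all y (by simp)
    have step : pvMinFrom key x (y :: t) = pvMinFrom key (if key y < key x then y else x) t := by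
      simp [pvMinFrom]
    rw [step]
    have hx'mem : ∀ z, z = (if key y < key x then y else x) → z ∈ x :: y :: t := by
      intro z hz; by_cases h : key y < key x <;> simp [h] at hz <;> simp [hz]
    apply ih (if key y < key x then y else x) b
    · refine List.pairwise_cons.mpr ⟨?_, hsort''⟩
      intro z hz
      by_cases h : key y < key x <;> simp [h]
      · exact hy_all z hz
      · exact hx_all z (by simp [hz])
    · -- membership of b in the reduced list
      rcases List.mem_cons.mp hb with hbx | hb'
      · -- b = x : the accumulator keeps x (key x ≤ key y)
        subst hbx
        have : ¬ key y < key b := by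
          have := hmin y (by simp)
          omega
        simp [this]
      rcases List.mem_cons.mp hb' with hby | hbt
      · -- b = y : the accumulator switches to y (key y < key x, strict by the tie rule)
        subst hby
        have hle : key b ≤ key x := by
          have := hmin x (by simp)
          omega
        have hne : key x ≠ key b := by
          intro he
          have := htie x (by simp) (by omega)
          omega
        have : key b < key x := by omega
        simp [this]
      · simp [hbt]
    · intro p hp
      rcases List.mem_cons.mp hp with hp1 | hp2
      · exact hmin p (hx'mem p hp1)
      · exact hmin p (by simp [hp2])
    · intro p hp
      rcases List.mem_cons.mp hp with hp1 | hp2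
      · exact htie p (hx'mem p hp1)
      · exact htie p (by simp [hp2])

theorem pvHit_lt (cs : List Char) (letter : String) (i : Int)
    (h : pvHit cs letter i = true) (h0 : 0 ≤ i) : i < (cs.length : Int) := by
  by_contra hlt
  simp only [pvHit, PySem.List.pyGet?, PySem.List.pyIdx?] at h
  have h1 : ¬ i < (cs.length : Int) := hlt
  simp [h1, h0] at h

theorem mem_pvPos (cs : List Char) (letter : String) (p : Int) :
    p ∈ pvPos cs letter ↔ 0 ≤ p ∧ p < (cs.length : Int) ∧ pvHit cs letter p = true := by
  simp only [pvPos, List.mem_map, List.mem_filter, PySem.List.mem_enumerate_iff]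
  constructor
  · rintro ⟨q, ⟨⟨k, hk, hq⟩, hmatch⟩, hfst⟩
    subst hq
    have hp : p = (k : Int) := by omega
    subst hp
    refine ⟨by omega, by exact_mod_cast hk, ?_⟩
    simp only [pvHit, PySem.List.pyGet?_eq_some_getElem cs (by omega : (0:Int) ≤ (k:Int)) (by exact_mod_cast hk)]
    simpa using hmatch
  · rintro ⟨h0, hlen, hhit⟩
    have hk : p.toNat < cs.length := by omega
    refine ⟨(p, cs[p.toNat]), ⟨⟨p.toNat, hk, by simp; omega⟩, ?_⟩, rfl⟩
    simp only [pvHit, PySem.List.pyGet?_eq_some_getElem cs h0 hlen] at hhit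
    simpa using hhit

theorem pairwise_pvPos (cs : List Char) (letter : String) :
    (pvPos cs letter).Pairwise (· < ·) := by
  unfold pvPos
  exact List.pairwise_map.mpr (((PySem.List.pairwise_lt_enumerate cs 0).filter _))

theorem pvScan_spec (cs : List Char) (letter : String) (middle : Int) (hm : 0 ≤ middle) :
    ∀ (fuel : Nat) (d : Int), 0 ≤ d →
      (∀ p : Int, pvHit cs letter p = true → 0 ≤ p → p < (cs.length : Int) → d ≤ |p - middle|) →
      ((pvScan cs letter middle d fuel = 0 ∧
          ∀ p : Int, pvHit cs letter p = true → 0 ≤ p → p < (cs.length : Int) →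
            d + fuel ≤ |p - middle|)
        ∨ (∃ b : Int, pvScan cs letter middle d fuel = b ∧ 0 ≤ b ∧ b < (cs.length : Int) ∧
            pvHit cs letter b = true ∧
            (∀ p : Int, pvHit cs letter p = true → 0 ≤ p → p < (cs.length : Int) →
              |b - middle| ≤ |p - middle|) ∧
            (∀ p : Int, pvHit cs letter p = true → 0 ≤ p → p < (cs.length : Int) →
              |p - middle| = |b - middle| → b ≤ p))) := by
  intro fuel
  induction fuel with
  | zero =>
    intro d hd hinv
    left
    refine ⟨rfl, ?_⟩
    intro p hp h0 h1
    have := hinv p hp h0 h1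
    push_cast
    omega
  | succ fuel ih =>
    intro d hd hinv
    have habs : |middle - d - middle| = d := by
      rw [show middle - d - middle = -d by ring, abs_neg, abs_of_nonneg hd]
    have habs' : |middle + d - middle| = d := by
      rw [show middle + d - middle = d by ring, abs_of_nonneg hd]
    by_cases c1 : ((0 ≤ middle - d : Bool) && pvHit cs letter (middle - d)) = true
    · right
      have heq : pvScan cs letter middle d (fuel + 1) = middle - d := by
        simp only [pvScan, c1, if_true]
      simp only [Bool.and_eq_true, decide_eq_true_eq] at c1
      obtain ⟨c1a, c1b⟩ := c1
      refine ⟨middle - d, heq, c1a, pvHit_lt cs letter _ c1b c1a, c1b, ?_, ?_⟩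
      · intro p hp h0 h1
        rw [habs]
        exact hinv p hp h0 h1
      · intro p hp h0 h1 hpe
        rw [habs] at hpe
        rcases (abs_eq hd).mp hpe with he | he <;> omega
    · by_cases c2 : ((middle + d < (cs.length : Int) : Bool) && pvHit cs letter (middle + d)) = true
      · right
        have heq : pvScan cs letter middle d (fuel + 1) = middle + d := by
          simp only [pvScan, c1, c2, if_true, if_false, Bool.false_eq_true]
        simp only [Bool.and_eq_true, decide_eq_true_eq] at c2
        obtain ⟨c2a, c2b⟩ := c2
        refine ⟨middle + d, heq, by omega, c2a, c2b, ?_, ?_⟩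
        · intro p hp h0 h1
          rw [habs']
          exact hinv p hp h0 h1
        · intro p hp h0 h1 hpe
          rw [habs'] at hpe
          rcases (abs_eq hd).mp hpe with he | he
          · omega
          · -- p = middle - d would have been taken by the left test first
            exfalso
            have hp' : p = middle - d := by omega
            apply c1
            simp only [Bool.and_eq_true, decide_eq_true_eq]
            exact ⟨by omega, hp' ▸ hp⟩
      · have heq : pvScan cs letter middle d (fuel + 1)
            = pvScan cs letter middle (d + 1) fuel := by
          simp only [pvScan, c1, c2, if_false, Bool.false_eq_true]
        have hinv' : ∀ p : Int, pvHit cs letter p = true → 0 ≤ p → p < (cs.length : Int) →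
            d + 1 ≤ |p - middle| := by
          intro p hp h0 h1
          have hge := hinv p hp h0 h1
          by_contra hcon
          have hpe : |p - middle| = d := by omega
          rcases (abs_eq hd).mp hpe with he | he
          · exact c2 (by simp only [Bool.and_eq_true, decide_eq_true_eq]; exact ⟨by omega, by rw [show middle + d = p by omega]; exact hp⟩)
          · exact c1 (by simp only [Bool.and_eq_true, decide_eq_true_eq]; exact ⟨by omega, by rw [show middle - d = p by omega]; exact hp⟩)
        rcases ih (d + 1) (by omega) hinv' with ⟨hz, hrest⟩ | ⟨b, hb, hrest⟩
        · left
          refine ⟨heq ▸ hz, ?_⟩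
          intro p hp h0 h1
          have := hrest p hp h0 h1
          push_cast at this ⊢
          omega
        · right
          exact ⟨b, heq ▸ hb, hrest⟩

theorem pv_main (word letter : String) :
    find_best_letter_position_py word letter = find_best_letter_position_py_alt word letter := by
  unfold find_best_letter_position_py find_best_letter_position_py_alt
  set cs := word.toList with hcs
  set middle : Int := PySem.Int.floordiv (cs.length : Int) 2 with hmid
  have hfd : middle = (cs.length : Int) / 2 := by
    rw [hmid, PySem.Int.floordiv_eq_ediv_of_pos (by omega)]
  have hm0 : 0 ≤ middle := by rw [hfd]; positivity
  by_cases hP : pvPos cs letter = []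
  · simp only [hP, if_true]
    by_cases hcse : cs.isEmpty
    · simp [hcse]
    · simp only [hcse, Bool.false_eq_true, if_false]
      rcases pvScan_spec cs letter middle hm0 (cs.length + 1) 0 le_rfl
          (fun p _ _ _ => abs_nonneg _) with ⟨hz, _⟩ | ⟨b, hb, h0, h1, hhit, _, _⟩
      · exact hz.symm
      · exfalso
        have : b ∈ pvPos cs letter := (mem_pvPos cs letter b).mpr ⟨h0, h1, hhit⟩
        simp [hP] at this
  · obtain ⟨p0, hp0⟩ := List.exists_mem_of_ne_nil _ hP
    obtain ⟨hp00, hp01, hp02⟩ := (mem_pvPos cs letter p0).mp hp0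
    have hn : 0 < cs.length := by omega
    have hcse : cs.isEmpty = false := by
      simp
      exact List.ne_nil_of_length_pos hn
    have hmlt : middle < (cs.length : Int) := by rw [hfd]; omega
    rcases pvScan_spec cs letter middle hm0 (cs.length + 1) 0 le_rfl
        (fun p _ _ _ => abs_nonneg _) with ⟨_, hbig⟩ | ⟨b, hb, hb0, hb1, hbhit, hbmin, hbtie⟩
    · exfalso
      have hcontra := hbig p0 hp02 hp00 hp01
      push_cast at hcontra
      rcases abs_cases (p0 - middle) with ⟨he, _⟩ | ⟨he, _⟩ <;> omega
    · have hbP : b ∈ pvPos cs letter := (mem_pvPos cs letter b).mpr ⟨hb0, hb1, hbhit⟩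
      have hmin' : ∀ p ∈ pvPos cs letter, |b - middle| ≤ |p - middle| := by
        intro p hp
        obtain ⟨h1, h2, h3⟩ := (mem_pvPos cs letter p).mp hp
        exact hbmin p h3 h1 h2
      have htie' : ∀ p ∈ pvPos cs letter, |p - middle| = |b - middle| → b ≤ p := by
        intro p hp
        obtain ⟨h1, h2, h3⟩ := (mem_pvPos cs letter p).mp hp
        exact hbtie p h3 h1 h2
      have hsorted := pairwise_pvPos cs letter
      rcases hPs : pvPos cs letter with _ | ⟨x, t⟩
      · exact absurd hPs hP
      rw [hPs] at hbP hmin' htie' hsorted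
      simp only [hcse, Bool.false_eq_true, if_false, reduceCtorEq]
      rw [hb]
      by_cases hlen : 1 < (x :: t).length
      · have hminfrom : pvMinFrom (fun p => |p - middle|) x t = b :=
          pvMinFrom_spec _ t x b hsorted hbP
            (fun p hp => hmin' p hp) (fun p hp => htie' p hp)
        simp only [hlen, if_true, pvMin?_cons, hminfrom]
      · have ht : t = [] := by
          cases t with
          | nil => rfl
          | cons z t' => simp at hlen
        subst ht
        simp only [hlen, if_false]
        have : b = x := by simpa using hbP
        simp [this]

-- ===== VERDICT (by name: the statement is the Claim_ definition above) =====
theorem find_best_letter_position_py_spec : Claim_equal_find_best_letter_position_py := by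
  intro word letter _
  unfold Spec_find_best_letter_position_py
  exact pv_main word letter
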